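-- pv_equiv track=rewrite | github.com/gkrishnan724/Cryptography-I | Week1/crypto.py | deduce_og_message
-- ===== SOURCE A (Python) =====
-- def get_likely_character(col_count, total_chars):
--     precision = 0
--
--     #If lot of unique characters this means that it is likely space
--     if (len(col_count) >= total_chars - precision):
--         return " "
--
--     #Find the max Ascii Key which is the likely character
--     max_count_key = (0, '*')
--     for key in col_count:
--         if key == "*":
--             continue
--         if col_count[key] > max_count_key[0]:
--             max_count_key = (col_count[key], key)
--
--     if max_count_key[1] == "*":
--         return '\x00'
--
--     # We get the opposite case of the character
--     return chr(ord(max_count_key[1]) ^ 0x20)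
--
-- def deduce_og_message(cipher, keyMatrix):
--
--     encoded_og_message = ""
--
--     #Find max column length
--     col_length = 0
--     for row in keyMatrix:
--         if col_length < len(row):
--             col_length = len(row)
--
--     #Doing column wise traversal
--     for col in range(col_length):
--         col_count = {}
--         for row in range(len(keyMatrix)):
--             if col < len(keyMatrix[row]):
--                 char = keyMatrix[row][col]
--                 if char in col_count:
--                     col_count[char] += 1
--                 else:
--                     col_count[char] = 1
--
--         likelyChar = get_likely_character(col_count, len(keyMatrix[row]))
--         encoded_og_message += likelyChar
--
--     return encoded_og_message
-- ===== SOURCE B (Python) =====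
-- def get_likely_character(col_count, total_chars):
--     precision = 0
--
--     #If lot of unique characters this means that it is likely space
--     if (len(col_count) >= total_chars - precision):
--         return " "
--
--     #Find the max Ascii Key which is the likely character
--     max_count_key = (0, '*')
--     for key in col_count:
--         if key == "*":
--             continue
--         if col_count[key] > max_count_key[0]:
--             max_count_key = (col_count[key], key)
--
--     if max_count_key[1] == "*":
--         return '\x00'
--
--     # We get the opposite case of the character
--     return chr(ord(max_count_key[1]) ^ 0x20)
--
-- def deduce_og_message(cipher, keyMatrix):
--     if not keyMatrix:
--         return ""
--
--     # ONE row-major pass: build a per-column character-count table, growing it lazily.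
--     counts = []
--     for row in keyMatrix:
--         counts.extend({} for _ in range(len(row) - len(counts)))
--         for d, ch in zip(counts, row):
--             d[ch] = d.get(ch, 0) + 1
--
--     total_chars = len(keyMatrix[-1])
--     return "".join(get_likely_character(d, total_chars) for d in counts)
-- ===== Notes on version B (the rewrite author's own statement) =====
-- stated objective: alternative
-- what changed: Replaces A's column-by-column re-scanning of the whole matrix (one pass over all rows per output column) with a single row-major pass that builds a lazily-grown per-column counter table, then reads the table left to right.
import Mathlib
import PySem

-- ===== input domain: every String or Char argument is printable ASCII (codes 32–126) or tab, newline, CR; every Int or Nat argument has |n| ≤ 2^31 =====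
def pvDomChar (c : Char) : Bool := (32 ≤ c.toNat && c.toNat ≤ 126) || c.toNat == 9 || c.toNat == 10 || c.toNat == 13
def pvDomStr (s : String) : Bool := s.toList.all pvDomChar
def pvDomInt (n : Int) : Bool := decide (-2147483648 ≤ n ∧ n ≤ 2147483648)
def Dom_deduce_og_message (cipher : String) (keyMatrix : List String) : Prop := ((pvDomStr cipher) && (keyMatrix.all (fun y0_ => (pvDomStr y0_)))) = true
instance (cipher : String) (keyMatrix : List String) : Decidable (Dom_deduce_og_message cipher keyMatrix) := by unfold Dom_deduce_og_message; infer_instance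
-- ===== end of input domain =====

-- B replaces A's repeated column-by-column scans of the matrix by ONE row-major pass that
-- builds a per-column counter table (objective: alternative decomposition; helper reused verbatim).

-- ===== PORT A =====
-- shared helper: get_likely_character appears VERBATIM in both Source A and Source B, so both ports call this one def
def get_likely_character (col_count : PySem.Dict Char Int) (total_chars : Int) : String :=
  let precision : Int := 0
  if (PySem.Dict.size col_count : Int) ≥ total_chars - precision then " "
  else
    let max_count_key : Int × Char :=
      (PySem.Dict.keys col_count).foldl (fun acc key =>
        if key = '*' then acc
        else if col_count.getD key 0 > acc.1 then (col_count.getD key 0, key) else acc)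
        ((0 : Int), '*')
    if max_count_key.2 = '*' then "\x00"
    -- chr(ord(key) ^ 0x20); key is ASCII (≤ 0x7E) so the xor stays a valid code point
    else String.ofList [Char.ofNat (max_count_key.2.toNat ^^^ 0x20)]

def deduce_og_message (cipher : String) (keyMatrix : List String) : String :=
  let col_length : Int :=
    keyMatrix.foldl (fun cl row => if cl < PySem.Str.len row then PySem.Str.len row else cl) 0
  (PySem.List.pyRange 0 col_length).foldl (fun msg col =>
    let col_count :=
      (PySem.List.pyRange 0 (PySem.List.len keyMatrix)).foldl (fun d row =>
        let rowS := PySem.List.pyGetD keyMatrix row ""   -- index from range(len(..)): always in range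
        if col < PySem.Str.len rowS then
          match PySem.Str.pyGet? rowS col with            -- char = keyMatrix[row][col]: in range by the guard
          | some ch => if d.contains ch then d.insert ch (d.getD ch 0 + 1) else d.insert ch 1
          | none => d                                      -- unreachable
        else d) (PySem.Dict.empty : PySem.Dict Char Int)
    -- Python's leftover inner-loop variable `row` equals len(keyMatrix)-1 here
    let total_chars := PySem.Str.len (PySem.List.pyGetD keyMatrix (PySem.List.len keyMatrix - 1) "")
    msg ++ get_likely_character col_count total_chars) ""

-- ===== PORT B =====
-- one row of the row-major pass: grow the table with fresh dicts (counts.extend),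
-- then the in-place `for d, ch in zip(counts, row): d[ch] = d.get(ch, 0) + 1`
-- rendered functionally (zipWith on the first len(row) entries, the rest unchanged — exact)
def pvBumpRow (tbl : List (PySem.Dict Char Int)) (cs : List Char) : List (PySem.Dict Char Int) :=
  let grown := tbl ++ List.replicate (cs.length - tbl.length) PySem.Dict.empty
  (List.zipWith (fun d c => d.insert c (d.getD c 0 + 1)) grown cs) ++ grown.drop cs.length

def deduce_og_message_alt (cipher : String) (keyMatrix : List String) : String :=
  if keyMatrix = [] then ""
  else
    let counts := keyMatrix.foldl (fun tbl row => pvBumpRow tbl row.toList) []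
    let total_chars := PySem.Str.len (PySem.List.pyGetD keyMatrix (-1) "")
    PySem.Str.join "" (counts.map (fun d => get_likely_character d total_chars))

-- ===== PRECONDITION & SPEC =====
def Spec_deduce_og_message (cipher : String) (keyMatrix : List String) (out : String) : Prop := out = deduce_og_message_alt cipher keyMatrix
instance (cipher : String) (keyMatrix : List String) (out : String) : Decidable (Spec_deduce_og_message cipher keyMatrix out) := by unfold Spec_deduce_og_message; infer_instance

-- ===== CLAIM (what is proved, stated in full; the proofs are below) =====
def Claim_equal_deduce_og_message : Prop := ∀ (cipher : String) (keyMatrix : List String), Dom_deduce_og_message cipher keyMatrix → Spec_deduce_og_message cipher keyMatrix (deduce_og_message cipher keyMatrix)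

-- ===== LEMMAS AND PROOFS =====

-- the characters of column i, in row order
def pvColChars (rows : List String) (i : Nat) : List Char := rows.filterMap (fun r => r.toList[i]?)

-- the maximum row length
def pvMaxLen (rows : List String) : Nat := rows.foldl (fun a r => max a r.toList.length) 0

theorem pvColChars_append (rows : List String) (r : String) (i : Nat) :
    pvColChars (rows ++ [r]) i = pvColChars rows i ++ (r.toList[i]?).toList := by
  simp [pvColChars, List.filterMap_append]
  cases h : r.toList[i]? <;> simp [h]

theorem pvLen_le_maxLen (rows : List String) (r : String) (hr : r ∈ rows) :
    r.toList.length ≤ pvMaxLen rows := by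
  have key : ∀ (l : List String) (n : Nat), r ∈ l →
      r.toList.length ≤ l.foldl (fun a s => max a s.toList.length) n := by
    intro l
    induction l with
    | nil => intro n h; simp at h
    | cons s t ih =>
      intro n h
      rcases List.mem_cons.mp h with h | h
      · subst h
        have mono : ∀ (l' : List String) (m m' : Nat), m ≤ m' →
            m ≤ l'.foldl (fun a s => max a s.toList.length) m' := by
          intro l'
          induction l' with
          | nil => intro m m' h; simpa using h
          | cons u v ihv => intro m m' h; exact ihv m (max m' u.toList.length) (le_trans h (Nat.le_max_left _ _))
        exact mono t _ _ (Nat.le_max_right _ _)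
      · exact ih _ h
  exact key rows 0 hr

theorem pvColChars_nil_of_ge (rows : List String) (i : Nat) (h : pvMaxLen rows ≤ i) :
    pvColChars rows i = [] := by
  simp only [pvColChars, List.filterMap_eq_nil_iff]
  intro r hr
  have h1 := pvLen_le_maxLen rows r hr
  rw [List.getElem?_eq_none_iff]
  omega

theorem pvMaxLen_append (rows : List String) (r : String) :
    pvMaxLen (rows ++ [r]) = max (pvMaxLen rows) r.toList.length := by
  simp [pvMaxLen, List.foldl_append]

-- A's col_length fold computes the max row length
theorem pvColLength_eq (rows : List String) :
    rows.foldl (fun cl row => if cl < PySem.Str.len row then PySem.Str.len row else cl) 0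
      = (pvMaxLen rows : Int) := by
  have key : ∀ (l : List String) (n : Nat),
      l.foldl (fun cl row => if cl < PySem.Str.len row then PySem.Str.len row else cl) (n : Int)
        = ((l.foldl (fun a r => max a r.toList.length) n : Nat) : Int) := by
    intro l
    induction l with
    | nil => intro n; simp
    | cons s t ih =>
      intro n
      simp only [List.foldl_cons]
      have hs : PySem.Str.len s = (s.toList.length : Int) := by simp [PySem.Str.len_eq]
      rw [hs, show ((if (n : Int) < (s.toList.length : Int) then (s.toList.length : Int) else (n : Int)))
        = ((max n s.toList.length : Nat) : Int) by split <;> omega]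
      exact ih _
  exact key rows 0

-- branch collapse: A's `if char in d: d[char] += 1 else: d[char] = 1`
theorem pvBump_eq (d : PySem.Dict Char Int) (c : Char) :
    (if d.contains c then d.insert c (d.getD c 0 + 1) else d.insert c 1)
      = d.insert c (d.getD c 0 + 1) := by
  cases h : d.contains c with
  | true => simp
  | false => simp [PySem.Dict.getD_of_not_contains d 0 h]

-- A's inner loop (as a fold over the rows themselves) builds the counter of column i
theorem pvInner_eq (rows : List String) (i : Nat) :
    rows.foldl (fun d rowS =>
        if (i : Int) < PySem.Str.len rowS then
          match PySem.Str.pyGet? rowS (i : Int) with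
          | some ch => if d.contains ch then d.insert ch (d.getD ch 0 + 1) else d.insert ch 1
          | none => d
        else d) (PySem.Dict.empty : PySem.Dict Char Int)
      = PySem.Dict.counter (pvColChars rows i) := by
  rw [← PySem.Dict.foldl_insert_getD_add_one_eq_counter]
  have key : ∀ (l : List String) (d : PySem.Dict Char Int),
      l.foldl (fun d rowS =>
        if (i : Int) < PySem.Str.len rowS then
          match PySem.Str.pyGet? rowS (i : Int) with
          | some ch => if d.contains ch then d.insert ch (d.getD ch 0 + 1) else d.insert ch 1
          | none => d
        else d) d
      = (pvColChars l i).foldl (fun d c => d.insert c (d.getD c 0 + 1)) d := by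
    intro l
    induction l with
    | nil => intro d; simp [pvColChars]
    | cons r t ih =>
      intro d
      have hcol : pvColChars (r :: t) i = (r.toList[i]?).toList ++ pvColChars t i := by
        simp [pvColChars]; cases h : r.toList[i]? <;> simp [h]
      rw [hcol]
      simp only [List.foldl_cons, List.foldl_append]
      have hlen : PySem.Str.len r = (r.toList.length : Int) := by simp [PySem.Str.len_eq]
      by_cases hi : i < r.toList.length
      · have hget : r.toList[i]? = some r.toList[i] := List.getElem?_eq_getElem hi
        rw [hlen, if_pos (by exact_mod_cast hi)]
        rw [show PySem.Str.pyGet? r (i : Int) = r.toList[i]? from PySem.Str.pyGet?_natCast r i]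
        rw [hget]
        simp only [Option.toList_some, List.foldl_cons, List.foldl_nil]
        rw [pvBump_eq]
        exact ih _
      · have hget : r.toList[i]? = none := by rw [List.getElem?_eq_none_iff]; omega
        rw [hlen, if_neg (by exact_mod_cast hi), hget]
        simpa using ih _
  exact key rows PySem.Dict.empty

-- string-building fold = join of map
theorem pvJoin_cons (a : String) (l : List String) :
    PySem.Str.join "" (a :: l) = a ++ PySem.Str.join "" l := by
  simp only [PySem.Str.join, PySem.Chars.join, String.toList_empty, List.map_cons]
  cases l with
  | nil => simp [List.intercalate]
  | cons b t => simp [List.intercalate, String.ofList_append]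

theorem pvFoldl_append_join {α : Type} (l : List α) (h : α → String) (s : String) :
    l.foldl (fun m x => m ++ h x) s = s ++ PySem.Str.join "" (l.map h) := by
  induction l generalizing s with
  | nil => simp [PySem.Str.join]
  | cons a t ih =>
    simp only [List.foldl_cons, List.map_cons]
    rw [ih, pvJoin_cons, ← String.append_assoc]

-- B's row-major fold builds the per-column counter table
theorem pvTable_eq (rows : List String) :
    rows.foldl (fun tbl row => pvBumpRow tbl row.toList) []
      = (List.range (pvMaxLen rows)).map (fun i => PySem.Dict.counter (pvColChars rows i)) := by
  induction rows using List.reverseRecOn with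
  | nil => simp [pvMaxLen]
  | append_singleton rows r ih =>
    rw [List.foldl_append, List.foldl_cons, List.foldl_nil, ih]
    set L := pvMaxLen rows with hL
    set cs := r.toList with hcs
    have hM : pvMaxLen (rows ++ [r]) = max L cs.length := pvMaxLen_append rows r
    set M := max L cs.length with hMdef
    have hGrowLen : ((List.range L).map (fun i => PySem.Dict.counter (pvColChars rows i))
        ++ List.replicate (cs.length - L) PySem.Dict.empty).length = M := by
      simp; omega
    have hGrowGet : ∀ (i : Nat) (hi : i < M),
        ((List.range L).map (fun i => PySem.Dict.counter (pvColChars rows i))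
          ++ List.replicate (cs.length - L) PySem.Dict.empty)[i]'(by rw [hGrowLen]; exact hi)
        = PySem.Dict.counter (pvColChars rows i) := by
      intro i hi
      by_cases h : i < L
      · rw [List.getElem_append_left (by simpa using h)]
        simp
      · rw [List.getElem_append_right (by simpa using h)]
        rw [List.getElem_replicate]
        rw [pvColChars_nil_of_ge rows i (by omega)]
        rfl
    rw [hM]
    apply List.ext_getElem
    · simp [pvBumpRow]
      omega
    · intro i hi1 hi2
      simp only [pvBumpRow]
      simp only [List.length_map, List.length_range] at hi1 ⊢
      have hcsM : cs.length ≤ M := le_max_right _ _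
      have hzlen : (List.zipWith (fun d c => d.insert c (d.getD c 0 + 1))
          ((List.range L).map (fun i => PySem.Dict.counter (pvColChars rows i))
            ++ List.replicate (cs.length - L) PySem.Dict.empty) cs).length = cs.length := by
        simp [List.length_zipWith]; omega
      have hiM : i < M := by simpa using hi2
      rw [List.getElem_map, List.getElem_range]
      by_cases h : i < cs.length
      · rw [List.getElem_append_left (by rw [hzlen]; exact h)]
        rw [List.getElem_zipWith]
        rw [hGrowGet i hiM]
        rw [pvColChars_append rows r i, ← hcs]
        rw [List.getElem?_eq_getElem h]
        simp only [Option.toList_some]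
        rw [PySem.Dict.counter_append_singleton]
        rfl
      · rw [List.getElem_append_right (by rw [hzlen]; omega)]
        rw [List.getElem_drop]
        simp only [hzlen]
        rw [hGrowGet (cs.length + (i - cs.length)) (by omega)]
        rw [pvColChars_append rows r i, ← hcs]
        rw [List.getElem?_eq_none (by omega)]
        simp only [Option.toList_none, List.append_nil]
        have : cs.length + (i - cs.length) = i := by omega
        rw [this]

-- keyMatrix[-1] = keyMatrix[len(keyMatrix)-1] on a nonempty list
theorem pvLast_eq (rows : List String) (h : rows ≠ []) (d : String) :
    PySem.List.pyGetD rows (-1) d = PySem.List.pyGetD rows (PySem.List.len rows - 1) d := by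
  have hl : 0 < rows.length := List.length_pos_iff.mpr h
  have e1 : PySem.List.pyIdx? rows.length (-1) = some (rows.length - 1) := by
    simp only [PySem.List.pyIdx?]
    rw [if_neg (by omega), if_pos (by omega)]
    norm_num
  have e2 : PySem.List.pyIdx? rows.length ((rows.length : Int) - 1) = some (rows.length - 1) := by
    simp only [PySem.List.pyIdx?]
    rw [if_pos (by omega), if_pos (by omega)]
    congr 1
    omega
  simp [PySem.List.pyGetD, PySem.List.pyGet?, PySem.List.len, e1, e2]

-- ===== VERDICT (by name: the statement is the Claim_ definition above) =====
theorem deduce_og_message_spec : Claim_equal_deduce_og_message := by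
  intro cipher rows _
  unfold Spec_deduce_og_message
  by_cases h : rows = []
  · subst h; rfl
  · simp only [deduce_og_message, deduce_og_message_alt, if_neg h]
    rw [pvColLength_eq rows, PySem.List.pyRange_zero_natCast, List.foldl_map]
    rw [pvTable_eq rows, List.map_map]
    rw [pvLast_eq rows h]
    have hinner : ∀ k : Nat,
        (PySem.List.pyRange 0 (PySem.List.len rows)).foldl (fun d row =>
          if (k : Int) < PySem.Str.len (PySem.List.pyGetD rows row "") then
            match PySem.Str.pyGet? (PySem.List.pyGetD rows row "") (k : Int) with
            | some ch => if d.contains ch then d.insert ch (d.getD ch 0 + 1) else d.insert ch 1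
            | none => d
          else d) (PySem.Dict.empty : PySem.Dict Char Int)
        = PySem.Dict.counter (pvColChars rows k) := by
      intro k
      have h0 := PySem.List.foldl_pyRange_pyGetD rows ""
        (fun d rowS => if (k : Int) < PySem.Str.len rowS then
              match PySem.Str.pyGet? rowS (k : Int) with
              | some ch => if d.contains ch then d.insert ch (d.getD ch 0 + 1) else d.insert ch 1
              | none => d
            else d) (PySem.Dict.empty : PySem.Dict Char Int) (le_refl 0)
      simp only [Int.toNat_zero, List.drop_zero] at h0
      rw [h0]
      exact pvInner_eq rows k
    simp only [hinner]
    rw [pvFoldl_append_join (List.range (pvMaxLen rows))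
      (fun k => get_likely_character (PySem.Dict.counter (pvColChars rows k))
        (PySem.Str.len (PySem.List.pyGetD rows (PySem.List.len rows - 1) ""))) ""]
    rfl
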